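-- pv_equiv track=rewrite | github.com/linggogo/ai_free_videos_download | backend/app/services/bilibili_subtitle.py | _select_best_subtitle
-- ===== SOURCE A (Python) =====
-- _SUBTITLE_LANG_PRIORITY = ["zh-CN", "zh", "zh-Hans", "ai-zh", "en", "ai-en", "ja", "ko"]
--
-- def _select_best_subtitle(subtitles: list[dict]) -> dict | None:
--     """从字幕列表中按优先级选择最佳字幕"""
--     if not subtitles:
--         return None
--     for lang in _SUBTITLE_LANG_PRIORITY:
--         for sub in subtitles:
--             if sub.get("lan") == lang:
--                 return sub
--     return subtitles[0]
-- ===== SOURCE B (Python) =====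
-- _SUBTITLE_LANG_PRIORITY = ["zh-CN", "zh", "zh-Hans", "ai-zh", "en", "ai-en", "ja", "ko"]
-- _RANK = {lang: i for i, lang in enumerate(_SUBTITLE_LANG_PRIORITY)}
--
-- def _select_best_subtitle(subtitles):
--     """Single pass: keep the subtitle with the smallest priority rank (first wins on ties)."""
--     if not subtitles:
--         return None
--     sentinel = len(_SUBTITLE_LANG_PRIORITY)
--     best = subtitles[0]
--     best_rank = _RANK.get(best.get("lan"), sentinel)
--     for sub in subtitles[1:]:
--         r = _RANK.get(sub.get("lan"), sentinel)
--         if r < best_rank: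
--             best, best_rank = sub, r
--     return best
-- ===== Notes on version B (the rewrite author's own statement) =====
-- stated objective: simpler
-- what changed: Replaced the nested priority-by-subtitle double scan with a precomputed language->rank dict and a single strict-min pass over the subtitles (first wins on ties; unmatched langs get rank len(priority), so the no-match case returns subtitles[0]).
import Mathlib
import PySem

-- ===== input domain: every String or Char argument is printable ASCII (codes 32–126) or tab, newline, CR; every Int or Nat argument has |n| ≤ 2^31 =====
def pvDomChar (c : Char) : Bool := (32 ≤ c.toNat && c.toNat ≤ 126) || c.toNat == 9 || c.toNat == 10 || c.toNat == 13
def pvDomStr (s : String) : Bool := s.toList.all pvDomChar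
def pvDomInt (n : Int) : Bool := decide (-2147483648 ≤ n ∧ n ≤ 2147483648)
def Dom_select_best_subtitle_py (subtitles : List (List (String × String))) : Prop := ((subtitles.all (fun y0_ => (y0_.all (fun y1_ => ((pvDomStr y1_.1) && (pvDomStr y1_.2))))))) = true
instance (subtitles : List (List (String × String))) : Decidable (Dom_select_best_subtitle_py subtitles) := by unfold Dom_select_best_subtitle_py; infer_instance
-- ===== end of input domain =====

-- B replaces A's nested priority-by-subtitle scan with one strict-min pass over the subtitles
-- using a precomputed language→rank dict (objective: simpler, a single loop instead of two nested ones).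

-- ===== PORT A =====
def pvPriority : List String := ["zh-CN", "zh", "zh-Hans", "ai-zh", "en", "ai-en", "ja", "ko"]

-- inner loop: first subtitle whose "lan" equals lang
def pvFindLang (lang : String) : List (List (String × String)) → Option (List (String × String))
  | [] => none
  | s :: rest =>
    if (PySem.Dict.mk s).get? "lan" == some lang then some s else pvFindLang lang rest

-- outer loop over the priority list
def pvOuter : List String → List (List (String × String)) → Option (List (String × String))
  | [], _ => none
  | l :: ls, subs =>
    match pvFindLang l subs with
    | some s => some s
    | none => pvOuter ls subs

def select_best_subtitle_py (subtitles : List (List (String × String))) : Option (List (String × String)) :=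
  match subtitles with
  | [] => none
  | x :: xs =>
    match pvOuter pvPriority (x :: xs) with
    | some s => some s
    | none => some x   -- return subtitles[0]

-- ===== PORT B =====
def pvRankDict : PySem.Dict String Nat :=
  PySem.Dict.ofList [("zh-CN", 0), ("zh", 1), ("zh-Hans", 2), ("ai-zh", 3), ("en", 4), ("ai-en", 5), ("ja", 6), ("ko", 7)]

-- _RANK.get(sub.get("lan"), 8); a None key never matches a string key, so it yields the default
def pvRank (s : List (String × String)) : Nat :=
  match (PySem.Dict.mk s).get? "lan" with
  | some l => pvRankDict.getD l 8
  | none => 8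

def pvBestLoop : List (List (String × String)) → List (String × String) → Nat → List (String × String)
  | [], best, _ => best
  | s :: rest, best, br =>
    let r := pvRank s
    if r < br then pvBestLoop rest s r else pvBestLoop rest best br

def select_best_subtitle_py_alt (subtitles : List (List (String × String))) : Option (List (String × String)) :=
  match subtitles with
  | [] => none
  | x :: xs => some (pvBestLoop xs x (pvRank x))

-- ===== PRECONDITION & SPEC =====
def Spec_select_best_subtitle_py (subtitles : List (List (String × String))) (out : Option (List (String × String))) : Prop := out = select_best_subtitle_py_alt subtitles
instance (subtitles : List (List (String × String))) (out : Option (List (String × String))) : Decidable (Spec_select_best_subtitle_py subtitles out) := by unfold Spec_select_best_subtitle_py; infer_instance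

-- ===== CLAIM (what is proved, stated in full; the proofs are below) =====
def Claim_equal_select_best_subtitle_py : Prop := ∀ (subtitles : List (List (String × String))), Dom_select_best_subtitle_py subtitles → Spec_select_best_subtitle_py subtitles (select_best_subtitle_py subtitles)

-- ===== LEMMAS AND PROOFS =====

-- the "lan" value of a subtitle
def pvLan (s : List (String × String)) : Option String := (PySem.Dict.mk s).get? "lan"

-- rank of a lan value within a (suffix of the) priority list
def pvRk : List String → Option String → Nat
  | [], _ => 0
  | l :: ls, o => if o == some l then 0 else pvRk ls o + 1

-- proof-side copy of the min loop, generic in the rank function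
def pvGBest (r : List (String × String) → Nat) :
    List (List (String × String)) → List (String × String) → Nat → List (String × String)
  | [], best, _ => best
  | s :: rest, best, br => if r s < br then pvGBest r rest s (r s) else pvGBest r rest best br

theorem pvBestLoop_eq_gBest (xs : List (List (String × String))) (b : List (String × String)) (br : Nat) :
    pvBestLoop xs b br = pvGBest pvRank xs b br := by
  induction xs generalizing b br with
  | nil => rfl
  | cons s rest ih => simp only [pvBestLoop, pvGBest]; split <;> exact ih _ _

theorem pvRankDict_eq_mk : pvRankDict =
    PySem.Dict.mk [("zh-CN", 0), ("zh", 1), ("zh-Hans", 2), ("ai-zh", 3), ("en", 4), ("ai-en", 5), ("ja", 6), ("ko", 7)] := by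
  decide

theorem pvRank_eq_rk (s : List (String × String)) : pvRank s = pvRk pvPriority (pvLan s) := by
  unfold pvRank pvLan
  cases h : (PySem.Dict.mk s).get? "lan" with
  | none => simp [pvRk, pvPriority]
  | some l =>
    simp only [pvRankDict_eq_mk, PySem.Dict.getD, PySem.Dict.get?_mk_cons, pvRk, pvPriority]
    by_cases h1 : l = "zh-CN" <;> by_cases h2 : l = "zh" <;> by_cases h3 : l = "zh-Hans" <;>
      by_cases h4 : l = "ai-zh" <;> by_cases h5 : l = "en" <;> by_cases h6 : l = "ai-en" <;>
      by_cases h7 : l = "ja" <;> by_cases h8 : l = "ko" <;>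
      simp_all [beq_iff_eq, PySem.Dict.get?]
    simp [Ne.symm h1, Ne.symm h2, Ne.symm h3, Ne.symm h4, Ne.symm h5, Ne.symm h6, Ne.symm h7, Ne.symm h8]

theorem pvGBest_no_lt (r : List (String × String) → Nat) (xs : List (List (String × String)))
    (b : List (String × String)) (br : Nat) (h : ∀ s ∈ xs, ¬ r s < br) :
    pvGBest r xs b br = b := by
  induction xs generalizing b with
  | nil => rfl
  | cons s rest ih =>
    simp only [pvGBest]
    rw [if_neg (h s (List.mem_cons_self))]
    exact ih b (fun t ht => h t (List.mem_cons_of_mem s ht))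

theorem pvGBest_find_zero (r : List (String × String) → Nat) (xs : List (List (String × String)))
    (b t : List (String × String)) (br : Nat) (hbr : 0 < br)
    (h : xs.find? (fun s => r s == 0) = some t) :
    pvGBest r xs b br = t := by
  induction xs generalizing b br with
  | nil => simp at h
  | cons s rest ih =>
    by_cases hs : r s = 0
    · have hts : s = t := by simpa [List.find?_cons, hs] using h
      subst hts
      simp only [pvGBest, hs, if_pos hbr]
      exact pvGBest_no_lt r rest s 0 (fun _ _ => by omega)
    · have h' : rest.find? (fun s => r s == 0) = some t := by
        simpa [List.find?_cons, hs] using h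
      simp only [pvGBest]
      split
      · exact ih s (r s) (by omega) h'
      · exact ih b br hbr h'

theorem pvGBest_shift (r r' : List (String × String) → Nat) (xs : List (List (String × String)))
    (b : List (String × String)) (br : Nat) (h : ∀ s ∈ xs, r' s = r s + 1) :
    pvGBest r' xs b (br + 1) = pvGBest r xs b br := by
  induction xs generalizing b br with
  | nil => rfl
  | cons s rest ih =>
    have hs := h s (List.mem_cons_self)
    have hrest : ∀ t ∈ rest, r' t = r t + 1 := fun t ht => h t (List.mem_cons_of_mem s ht)
    simp only [pvGBest, hs]
    by_cases hlt : r s < br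
    · rw [if_pos (by omega), if_pos hlt]; exact ih s (r s) hrest
    · rw [if_neg (by omega), if_neg hlt]; exact ih b br hrest

theorem pvFindLang_eq_find? (l : String) (subs : List (List (String × String))) :
    pvFindLang l subs = subs.find? (fun s => pvLan s == some l) := by
  induction subs with
  | nil => rfl
  | cons s rest ih =>
    simp only [pvFindLang, pvLan, List.find?_cons]
    by_cases h : ((PySem.Dict.mk s).get? "lan" == some l) = true
    · simp [h]
    · simp only [h, Bool.false_eq_true, if_false]
      rw [ih]
      simp [pvLan]

theorem pvMain (ls : List String) (x : List (String × String)) (xs : List (List (String × String))) :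
    (match pvOuter ls (x :: xs) with
     | some s => some s
     | none => some x)
    = some (pvGBest (fun s => pvRk ls (pvLan s)) xs x (pvRk ls (pvLan x))) := by
  induction ls generalizing x xs with
  | nil =>
    simp only [pvOuter, pvRk]
    rw [pvGBest_no_lt _ _ _ _ (fun s _ => by omega)]
  | cons l ls ih =>
    have hpred : (fun s => pvRk (l :: ls) (pvLan s) == 0) = (fun s => pvLan s == some l) := by
      funext s
      by_cases h : pvLan s == some l <;> simp [pvRk, h]
    cases hfind : pvFindLang l (x :: xs) with
    | some t =>
      have hfind' : (x :: xs).find? (fun s => pvLan s == some l) = some t := by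
        rw [← pvFindLang_eq_find?]; exact hfind
      simp only [pvOuter, hfind]
      by_cases hx : (pvLan x == some l) = true
      · have hxt : x = t := by simpa [List.find?_cons, hx] using hfind'
        subst hxt
        have hbr : pvRk (l :: ls) (pvLan x) = 0 := by simp [pvRk, hx]
        rw [hbr, pvGBest_no_lt _ _ _ _ (fun s _ => by omega)]
      · have hxs : xs.find? (fun s => pvLan s == some l) = some t := by
          simpa [List.find?_cons, hx] using hfind'
        have hbr : pvRk (l :: ls) (pvLan x) = pvRk ls (pvLan x) + 1 := by simp [pvRk, hx]
        rw [hbr, pvGBest_find_zero _ _ _ t _ (by omega) (by rw [hpred]; exact hxs)]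
    | none =>
      have hnone : ∀ s ∈ x :: xs, ¬ (pvLan s == some l) = true := by
        rw [pvFindLang_eq_find?] at hfind
        exact fun s hs => by simpa using List.find?_eq_none.mp hfind s hs
      have hshift : ∀ s ∈ xs, pvRk (l :: ls) (pvLan s) = pvRk ls (pvLan s) + 1 := by
        intro s hs
        simp [pvRk, hnone s (List.mem_cons_of_mem x hs)]
      have hx : pvRk (l :: ls) (pvLan x) = pvRk ls (pvLan x) + 1 := by
        simp [pvRk, hnone x List.mem_cons_self]
      simp only [pvOuter, hfind]
      rw [hx, pvGBest_shift _ _ _ _ _ hshift]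
      exact ih x xs

-- ===== VERDICT (by name: the statement is the Claim_ definition above) =====
theorem select_best_subtitle_py_spec : Claim_equal_select_best_subtitle_py := by
  intro subtitles _
  unfold Spec_select_best_subtitle_py
  cases subtitles with
  | nil => rfl
  | cons x xs =>
    simp only [select_best_subtitle_py, select_best_subtitle_py_alt]
    rw [pvBestLoop_eq_gBest]
    have hfun : pvGBest pvRank xs x (pvRank x)
        = pvGBest (fun s => pvRk pvPriority (pvLan s)) xs x (pvRk pvPriority (pvLan x)) := by
      have h : pvRank = fun s => pvRk pvPriority (pvLan s) := funext pvRank_eq_rk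
      rw [h]
    rw [hfun, ← pvMain pvPriority x xs]
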